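-- pv_equiv track=rewrite | github.com/MonarcShadow/Seminario_1_proyecto | Pacman/search_food.py | get_start_and_food
-- ===== SOURCE A (Python) =====
-- def get_start_and_food(layout):
--     start = None
--     food = set()
--     for i,row in enumerate(layout):
--         for j,cell in enumerate(row):
--             if cell == ".":
--                 food.add((i,j))
--                 if start is None:
--                     start = (i,j)
--     return start, food
-- ===== SOURCE B (Python) =====
-- def get_start_and_food(layout):
--     food = {(i, j)
--             for i, row in enumerate(layout)
--             for j, cell in enumerate(row)
--             if cell == "."}
--     start = min(food) if food else None
--     return start, food
-- ===== Notes on version B (the rewrite author's own statement) =====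
-- stated objective: simpler
-- what changed: B collects the food set in a plain comprehension with no start tracking, then recovers the start cell as a separate min-reduction (row-major first '.' = lexicographic minimum of the tuples), replacing A's interleaved sentinel-guarded single pass by a populate-then-reduce two-phase structure.
import Mathlib
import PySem

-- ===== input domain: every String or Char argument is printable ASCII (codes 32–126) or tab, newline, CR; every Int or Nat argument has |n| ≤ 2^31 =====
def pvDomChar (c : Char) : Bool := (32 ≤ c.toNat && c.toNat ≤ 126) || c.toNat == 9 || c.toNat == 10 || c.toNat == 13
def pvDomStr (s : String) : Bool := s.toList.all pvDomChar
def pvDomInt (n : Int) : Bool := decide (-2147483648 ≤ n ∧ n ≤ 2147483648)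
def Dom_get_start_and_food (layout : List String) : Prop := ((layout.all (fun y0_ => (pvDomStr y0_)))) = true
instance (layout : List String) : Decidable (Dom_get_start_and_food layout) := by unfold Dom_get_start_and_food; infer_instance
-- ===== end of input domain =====

-- B replaces A's interleaved sentinel-guarded single pass by a two-phase structure:
-- collect the food set with no start tracking, then recover start as min(food) (lexicographic
-- tuple minimum = row-major first find); objective: simpler.

-- ===== PORT A =====
def get_start_and_food (layout : List String) : (Option (Int × Int)) × (List (Int × Int)) :=
  (PySem.List.enumerate layout 0).foldl
    (fun (s : Option (Int × Int) × PySem.Set (Int × Int)) p =>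
      (PySem.List.enumerate p.2.toList 0).foldl
        (fun s q =>
          if q.2 = '.' then
            ((if s.1 = none then some (p.1, q.1) else s.1), PySem.Set.add s.2 (p.1, q.1))
          else s)
        s)
    (none, PySem.Set.empty)

-- ===== PORT B =====
def get_start_and_food_alt (layout : List String) : (Option (Int × Int)) × (List (Int × Int)) :=
  let food : PySem.Set (Int × Int) :=
    (PySem.List.enumerate layout 0).foldl
      (fun (s : PySem.Set (Int × Int)) p =>
        (PySem.List.enumerate p.2.toList 0).foldl
          (fun s q => if q.2 = '.' then PySem.Set.add s (p.1, q.1) else s)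
          s)
      PySem.Set.empty
  let start : Option (Int × Int) :=
    if food = [] then none else PySem.List.min2? food (fun c => c.1) (fun c => c.2)
  (start, food)

-- ===== PRECONDITION & SPEC =====
def Spec_get_start_and_food (layout : List String) (out : (Option (Int × Int)) × (List (Int × Int))) : Prop := out = get_start_and_food_alt layout
instance (layout : List String) (out : (Option (Int × Int)) × (List (Int × Int))) : Decidable (Spec_get_start_and_food layout out) := by unfold Spec_get_start_and_food; infer_instance

-- ===== CLAIM (what is proved, stated in full; the proofs are below) =====
def Claim_equal_get_start_and_food : Prop := ∀ (layout : List String), Dom_get_start_and_food layout → Spec_get_start_and_food layout (get_start_and_food layout)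

-- ===== LEMMAS AND PROOFS =====

-- Python's lexicographic order on int pairs.
def pvLexLt (a b : Int × Int) : Prop := a.1 < b.1 ∨ (a.1 = b.1 ∧ a.2 < b.2)

-- The inner (per-row) step functions of the two ports.
def pvStepA (i : Int) (s : Option (Int × Int) × PySem.Set (Int × Int)) (q : Int × Char) :
    Option (Int × Int) × PySem.Set (Int × Int) :=
  if q.2 = '.' then
    ((if s.1 = none then some (i, q.1) else s.1), PySem.Set.add s.2 (i, q.1))
  else s

def pvStepB (i : Int) (s : PySem.Set (Int × Int)) (q : Int × Char) : PySem.Set (Int × Int) :=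
  if q.2 = '.' then PySem.Set.add s (i, q.1) else s

-- A's food component is exactly B's food fold (row level).
theorem pvRowFoodEq (i : Int) (l : List (Int × Char)) (s : Option (Int × Int) × PySem.Set (Int × Int)) :
    (l.foldl (pvStepA i) s).2 = l.foldl (pvStepB i) s.2 := by
  induction l generalizing s with
  | nil => rfl
  | cons q t ih =>
      simp only [List.foldl_cons, ih]
      congr 1
      by_cases h : q.2 = '.' <;> simp [pvStepA, pvStepB, h]

-- A's food component is exactly B's food fold (grid level).
theorem pvFoodEq (l : List (Int × String)) (s : Option (Int × Int) × PySem.Set (Int × Int)) :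
    (l.foldl (fun s p => (PySem.List.enumerate p.2.toList 0).foldl (pvStepA p.1) s) s).2 =
    l.foldl (fun s p => (PySem.List.enumerate p.2.toList 0).foldl (pvStepB p.1) s) s.2 := by
  induction l generalizing s with
  | nil => rfl
  | cons p t ih => simp only [List.foldl_cons, ih, pvRowFoodEq]

-- The invariant of A's loop: the start component is the head of the food list.
theorem pvStepA_head (i : Int) (s : Option (Int × Int) × PySem.Set (Int × Int))
    (h : s.1 = s.2.head?) (q : Int × Char) : (pvStepA i s q).1 = (pvStepA i s q).2.head? := by
  by_cases hc : q.2 = '.'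
  · simp only [pvStepA, hc, if_pos]
    match hs : s.2 with
    | [] =>
        have : s.1 = none := by rw [h, hs]; rfl
        simp [this, PySem.Set.add, PySem.Set.contains]
    | x :: t =>
        have : s.1 = some x := by rw [h, hs]; rfl
        rw [this]
        simp only [PySem.Set.add_eq_ite]
        by_cases hm : (i, q.1) ∈ x :: t <;> simp [hm]
  · simpa [pvStepA, hc] using h

theorem pvRowStartEq (i : Int) (l : List (Int × Char)) (s : Option (Int × Int) × PySem.Set (Int × Int))
    (h : s.1 = s.2.head?) :
    (l.foldl (pvStepA i) s).1 = (l.foldl (pvStepA i) s).2.head? := by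
  induction l generalizing s with
  | nil => exact h
  | cons q t ih => exact ih _ (pvStepA_head i s h q)

theorem pvStartEq (l : List (Int × String)) (s : Option (Int × Int) × PySem.Set (Int × Int))
    (h : s.1 = s.2.head?) :
    (l.foldl (fun s p => (PySem.List.enumerate p.2.toList 0).foldl (pvStepA p.1) s) s).1 =
    (l.foldl (fun s p => (PySem.List.enumerate p.2.toList 0).foldl (pvStepA p.1) s) s).2.head? := by
  induction l generalizing s with
  | nil => exact h
  | cons p t ih => exact ih _ (pvRowStartEq p.1 _ s h)

-- B's food fold is Set.update with the row-major list of food coordinates.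
theorem pvRowFoldB (i : Int) (l : List (Int × Char)) (s : PySem.Set (Int × Int)) :
    l.foldl (pvStepB i) s =
    PySem.Set.update s ((l.filter (fun q => decide (q.2 = '.'))).map (fun q => (i, q.1))) := by
  rw [PySem.Set.update_map_eq_foldl_add]
  exact PySem.List.foldl_ite_eq_foldl_filter (fun q : Int × Char => q.2 = '.')
    (fun s q => PySem.Set.add s (i, q.1)) l s

def pvCoords (l : List (Int × String)) : List (Int × Int) :=
  l.flatMap (fun p =>
    (((PySem.List.enumerate p.2.toList 0).filter (fun q => decide (q.2 = '.'))).map (fun q => (p.1, q.1))))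

theorem pvFoldB_eq_update (l : List (Int × String)) (s : PySem.Set (Int × Int)) :
    l.foldl (fun s p => (PySem.List.enumerate p.2.toList 0).foldl (pvStepB p.1) s) s =
    PySem.Set.update s (pvCoords l) := by
  induction l generalizing s with
  | nil => rfl
  | cons p t ih =>
      have hc : pvCoords (p :: t) =
          (((PySem.List.enumerate p.2.toList 0).filter (fun q => decide (q.2 = '.'))).map
            (fun q => (p.1, q.1))) ++ pvCoords t := by
        simp [pvCoords]
      rw [List.foldl_cons, pvRowFoldB, ih, hc, PySem.Set.update_append]

-- The coordinate list is strictly increasing in Python's lexicographic pair order.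
theorem pvCoords_pairwise (l : List (Int × String)) (hl : l.Pairwise (fun p q => p.1 < q.1)) :
    (pvCoords l).Pairwise pvLexLt := by
  unfold pvCoords
  rw [List.pairwise_flatMap]
  constructor
  · intro p _
    refine List.Pairwise.map _ ?_ (List.Pairwise.filter _ (PySem.List.pairwise_lt_enumerate _ 0))
    intro a b hab
    exact Or.inr ⟨rfl, hab⟩
  · refine hl.imp ?_
    intro p q hpq x hx y hy
    simp only [List.mem_map] at hx hy
    obtain ⟨a, -, rfl⟩ := hx
    obtain ⟨b, -, rfl⟩ := hy
    exact Or.inl hpq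

theorem pvLexLt_irrefl (a : Int × Int) : ¬ pvLexLt a a := by
  simp [pvLexLt]

theorem pvCoords_nodup (l : List (Int × String)) (hl : l.Pairwise (fun p q => p.1 < q.1)) :
    (pvCoords l).Nodup := by
  refine (pvCoords_pairwise l hl).imp ?_
  intro a b hab h
  subst h; exact pvLexLt_irrefl a hab

-- min2? of a strictly lex-increasing list is its head.
theorem pvMin2_of_head_lt (x : Int × Int) (t : List (Int × Int)) (h : ∀ y ∈ t, pvLexLt x y) :
    PySem.List.min2? (x :: t) (fun c => c.1) (fun c => c.2) = some x := by
  show t.foldl _ (some x) = some x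
  induction t with
  | nil => rfl
  | cons y u ih =>
      have hy := h y (List.mem_cons_self)
      have hstep :
          (if (decide (y.1 < x.1) || !decide (x.1 < y.1) && decide (y.2 < x.2)) = true
           then some y else some x) = some x := by
        rcases hy with h1 | ⟨h1, h2⟩
        · simp [h1, not_lt.mpr (le_of_lt h1)]
        · simp [h1, not_lt.mpr (le_of_lt h2)]
      simp only [List.foldl_cons, hstep]
      exact ih (fun z hz => h z (List.mem_cons_of_mem _ hz))

theorem pvMin2_eq_head (fd : List (Int × Int)) (hp : fd.Pairwise pvLexLt) :
    (if fd = [] then none else PySem.List.min2? fd (fun c => c.1) (fun c => c.2)) = fd.head? := by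
  match fd with
  | [] => rfl
  | x :: t =>
      simp only [List.cons_ne_nil, List.head?_cons]
      exact pvMin2_of_head_lt x t (List.pairwise_cons.mp hp).1

-- ===== VERDICT (by name: the statement is the Claim_ definition above) =====
theorem get_start_and_food_spec : Claim_equal_get_start_and_food := by
  intro layout _
  show _ = _
  have hA : get_start_and_food layout =
      ((PySem.List.enumerate layout 0).foldl
        (fun s p => (PySem.List.enumerate p.2.toList 0).foldl (pvStepA p.1) s)
        (none, PySem.Set.empty)) := rfl
  have hfd : ((PySem.List.enumerate layout 0).foldl
        (fun s p => (PySem.List.enumerate p.2.toList 0).foldl (pvStepA p.1) s)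
        (none, PySem.Set.empty)).2 = pvCoords (PySem.List.enumerate layout 0) := by
    rw [pvFoodEq]
    show List.foldl (fun (s : PySem.Set (Int × Int)) (p : Int × String) => (PySem.List.enumerate p.2.toList 0).foldl (pvStepB p.1) s) ([] : PySem.Set (Int × Int)) _ = _
    rw [pvFoldB_eq_update, PySem.Set.update_nil_left,
      PySem.Set.ofList_eq_self_of_nodup _
        (pvCoords_nodup _ (PySem.List.pairwise_lt_enumerate layout 0))]
  have hB : get_start_and_food_alt layout =
      ((if pvCoords (PySem.List.enumerate layout 0) = [] then none
        else PySem.List.min2? (pvCoords (PySem.List.enumerate layout 0)) (fun c => c.1) (fun c => c.2)),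
        pvCoords (PySem.List.enumerate layout 0)) := by
    unfold get_start_and_food_alt
    have : (PySem.List.enumerate layout 0).foldl
        (fun (s : PySem.Set (Int × Int)) p =>
          (PySem.List.enumerate p.2.toList 0).foldl
            (fun s q => if q.2 = '.' then PySem.Set.add s (p.1, q.1) else s) s)
        PySem.Set.empty = pvCoords (PySem.List.enumerate layout 0) := by
      show List.foldl (fun (s : PySem.Set (Int × Int)) (p : Int × String) => (PySem.List.enumerate p.2.toList 0).foldl (pvStepB p.1) s)
        ([] : PySem.Set (Int × Int)) _ = _
      rw [pvFoldB_eq_update, PySem.Set.update_nil_left,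
        PySem.Set.ofList_eq_self_of_nodup _
          (pvCoords_nodup _ (PySem.List.pairwise_lt_enumerate layout 0))]
    simp only [this]
  rw [hA, hB]
  refine Prod.ext ?_ hfd
  rw [pvStartEq _ _ rfl, hfd,
    pvMin2_eq_head _ (pvCoords_pairwise _ (PySem.List.pairwise_lt_enumerate layout 0))]
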